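-- pv_equiv track=rewrite | github.com/Eulring/DMNER | S1-EBD/uni/predict2BEL.py | word_level_align
-- ===== SOURCE A (Python) =====
-- def equal(s1, s2): return s1.lower() == s2.lower()
--
-- def word_level_align(words, mention):
--     mwords = mention.split(' ')
--     n = len(words)
--     m = len(mwords)
--     spans = []
--     for i in range(n - m + 1):
--         for j in range(m):
--             if not equal(words[i + j], mwords[j]):
--                 break
--             if j == m - 1:
--                 spans.append([i, i + m - 1])
--     return spans
-- ===== SOURCE B (Python) =====
-- def word_level_align(words, mention):
--     # Rabin-Karp: rolling polynomial hash over lowercased tokens, verify on hash hit.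
--     lm = [w.lower() for w in mention.split(' ')]
--     lw = [w.lower() for w in words]
--     m = len(lm)
--     n = len(lw)
--     if m > n:
--         return []
--     BASE = 1000003
--     def h(w):
--         v = 0
--         for c in w:
--             v = v * 257 + ord(c)
--         return v
--     hs = [h(w) for w in lw]
--     target = 0
--     for x in lm:
--         target = target * BASE + h(x)
--     pw = BASE ** (m - 1)
--     cur = 0
--     for k in range(m):
--         cur = cur * BASE + hs[k]
--     spans = []
--     for i in range(n - m + 1):
--         if cur == target and lw[i:i + m] == lm:
--             spans.append([i, i + m - 1])
--         if i + m < n: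
--             cur = (cur - hs[i] * pw) * BASE + hs[i + m]
--     return spans
-- ===== Notes on version B (the rewrite author's own statement) =====
-- stated objective: faster
-- what changed: B is Rabin-Karp: it lowercases tokens once, hashes each token, maintains a rolling polynomial window hash over the word sequence and only compares the actual window to the mention on a hash hit, instead of A's nested loop that re-lowercases and compares strings at every (i,j) position.
import Mathlib
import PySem

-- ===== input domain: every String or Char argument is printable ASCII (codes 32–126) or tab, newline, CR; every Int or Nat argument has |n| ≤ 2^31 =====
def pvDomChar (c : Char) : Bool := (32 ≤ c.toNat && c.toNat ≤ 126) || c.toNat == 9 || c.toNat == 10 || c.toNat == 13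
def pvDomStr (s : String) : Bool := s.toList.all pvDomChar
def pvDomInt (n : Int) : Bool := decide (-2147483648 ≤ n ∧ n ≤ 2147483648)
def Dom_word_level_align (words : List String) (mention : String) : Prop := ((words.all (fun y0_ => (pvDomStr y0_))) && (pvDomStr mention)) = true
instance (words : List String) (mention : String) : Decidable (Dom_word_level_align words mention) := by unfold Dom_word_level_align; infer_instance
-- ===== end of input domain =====

-- B replaces A's nested re-lowercase-and-compare loop by Rabin-Karp: tokens are
-- lowercased and hashed once, a rolling polynomial window hash is maintained, and the
-- window is compared to the mention only on a hash hit (objective: faster).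

-- ===== PORT A =====
-- def equal(s1, s2): return s1.lower() == s2.lower()
def pvEqual (s1 s2 : String) : Bool := PySem.Str.lower s1 == PySem.Str.lower s2

-- the inner 'for j in range(m)' loop with its break; spans is the accumulator
def pvInnerA (words mwords : List String) (i m : Int) (spans : List (List Int)) :
    List Int → List (List Int)
  | [] => spans
  | j :: js =>
    if !(pvEqual (PySem.List.pyGetD words (i + j) "") (PySem.List.pyGetD mwords j "")) then
      spans
    else
      pvInnerA words mwords i m
        (if j = m - 1 then spans ++ [[i, i + m - 1]] else spans) js

def word_level_align (words : List String) (mention : String) : List (List Int) :=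
  let mwords := (PySem.Str.split? mention " ").getD []
  let n : Int := (words.length : Int)
  let m : Int := (mwords.length : Int)
  (PySem.List.pyRange 0 (n - m + 1) 1).foldl
    (fun spans i => pvInnerA words mwords i m spans (PySem.List.pyRange 0 m 1)) []

-- ===== PORT B =====
-- def h(w): v = 0; for c in w: v = v*257 + ord(c); return v
def pvH (w : String) : Int :=
  w.toList.foldl (fun v c => v * 257 + (c.toNat : Int)) 0

-- the body of B's main loop: maybe append the span, then roll the window hash
def pvStepB (hs : List Int) (lw lm : List String) (target pw n m : Int) :
    (Int × List (List Int)) → Int → (Int × List (List Int)) := fun st i =>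
  let spans := if st.1 == target && (PySem.List.slice lw (some i) (some (i + m)) == lm)
    then st.2 ++ [[i, i + m - 1]] else st.2
  let cur := if i + m < n
    then (st.1 - PySem.List.pyGetD hs i 0 * pw) * 1000003 + PySem.List.pyGetD hs (i + m) 0
    else st.1
  (cur, spans)

def word_level_align_alt (words : List String) (mention : String) : List (List Int) :=
  let lm := ((PySem.Str.split? mention " ").getD []).map PySem.Str.lower
  let lw := words.map PySem.Str.lower
  let m : Int := (lm.length : Int)
  let n : Int := (lw.length : Int)
  if m > n then []
  else
    let hs := lw.map pvH
    let target := lm.foldl (fun a x => a * 1000003 + pvH x) 0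
    let pw : Int := 1000003 ^ (m - 1).toNat
    let cur := (PySem.List.pyRange 0 m 1).foldl
      (fun a k => a * 1000003 + PySem.List.pyGetD hs k 0) 0
    ((PySem.List.pyRange 0 (n - m + 1) 1).foldl (pvStepB hs lw lm target pw n m) (cur, [])).2

-- ===== PRECONDITION & SPEC =====
def Spec_word_level_align (words : List String) (mention : String) (out : List (List Int)) : Prop := out = word_level_align_alt words mention
instance (words : List String) (mention : String) (out : List (List Int)) : Decidable (Spec_word_level_align words mention out) := by unfold Spec_word_level_align; infer_instance

-- ===== CLAIM (what is proved, stated in full; the proofs are below) =====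
def Claim_equal_word_level_align : Prop := ∀ (words : List String) (mention : String), Dom_word_level_align words mention → Spec_word_level_align words mention (word_level_align words mention)

-- ===== LEMMAS AND PROOFS =====

-- the rolling-hash combination, as a function of the window (proof-side only)
def pvHroll (l : List Int) : Int := l.foldl (fun a x => a * 1000003 + x) 0

-- mention.split(' ') is never the empty list
lemma pvGo_ne_nil (fuel : Nat) : ∀ (sep l cur : List Char) (acc : List (List Char)),
    PySem.Chars.splitOn.go sep fuel l cur acc ≠ [] := by
  induction fuel with
  | zero => intro sep l cur acc; simp [PySem.Chars.splitOn.go]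
  | succ f ih =>
    intro sep l cur acc
    cases l with
    | nil => simp [PySem.Chars.splitOn.go]
    | cons c rest =>
      simp only [PySem.Chars.splitOn.go]
      split
      · exact ih _ _ _ _
      · exact ih _ _ _ _

lemma pvSplit_ne_nil (mention : String) :
    ((PySem.Str.split? mention " ").getD []) ≠ [] := by
  simp only [PySem.Str.split?, PySem.Chars.split?]
  simp [PySem.Chars.splitOn, pvGo_ne_nil]

-- characterisation of A's inner loop
lemma pvInnerA_eq (words mwords : List String) (i m : Int) :
    ∀ (d : Nat) (j : Int), j = m - 1 - (d : Int) → 0 ≤ j →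
    ∀ spans, pvInnerA words mwords i m spans (PySem.List.pyRange j m 1) =
      if (PySem.List.pyRange j m 1).all
          (fun k => pvEqual (PySem.List.pyGetD words (i + k) "") (PySem.List.pyGetD mwords k "")) then
        spans ++ [[i, i + m - 1]]
      else spans := by
  intro d
  induction d with
  | zero =>
    intro j hj h0 spans
    have hm : m = j + 1 := by omega
    subst hm
    rw [PySem.List.pyRange_one_singleton]
    by_cases h : pvEqual (PySem.List.pyGetD words (i + j) "") (PySem.List.pyGetD mwords j "") <;>
      simp [pvInnerA, h]
  | succ f ih =>
    intro j hj h0 spans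
    have hjm : j < m := by omega
    rw [PySem.List.pyRange_one_cons hjm]
    by_cases h : pvEqual (PySem.List.pyGetD words (i + j) "") (PySem.List.pyGetD mwords j "")
    · have hne : ¬ (j = m - 1) := by omega
      have := ih (j + 1) (by omega) (by omega) spans
      simp [pvInnerA, h, hne, this]
    · simp [pvInnerA, h]

-- the per-position tests of A and B agree when the window fits
lemma pvCond_eq (words mwords : List String) (i : Int) (h0 : 0 ≤ i)
    (h1 : i + (mwords.length : Int) ≤ (words.length : Int)) :
    ((PySem.List.pyRange 0 (mwords.length : Int) 1).all
        (fun k => pvEqual (PySem.List.pyGetD words (i + k) "") (PySem.List.pyGetD mwords k "")))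
    = (PySem.List.slice (words.map PySem.Str.lower) (some i)
        (some (i + (mwords.length : Int))) == mwords.map PySem.Str.lower) := by
  obtain ⟨iN, rfl⟩ := Int.eq_ofNat_of_zero_le h0
  set mN := mwords.length with hmN
  have hiN : iN + mN ≤ words.length := by exact_mod_cast h1
  rw [PySem.List.slice_natCast_add]
  rw [Bool.eq_iff_iff]
  simp only [List.all_eq_true, beq_iff_eq]
  constructor
  · intro h
    apply List.ext_getElem
    · simp; omega
    · intro k hk1 hk2
      have hkm : k < mN := by simpa using hk2
      have hkey := h ((k : Nat) : Int) (by
        rw [PySem.List.mem_pyRange_one]; constructor <;> [positivity; exact_mod_cast hkm])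
      have hiw : iN + k < words.length := by omega
      rw [pvEqual] at hkey
      rw [show ((iN : Int) + (k : Int)) = ((iN + k : Nat) : Int) by push_cast; ring] at hkey
      rw [PySem.List.pyGetD_natCast, PySem.List.pyGetD_natCast] at hkey
      rw [List.getD_eq_getElem _ _ hiw, List.getD_eq_getElem _ _ hkm] at hkey
      simp only [beq_iff_eq] at hkey
      simp [List.getElem_take, List.getElem_drop, hkey]
  · intro h k hk
    rw [PySem.List.mem_pyRange_one] at hk
    obtain ⟨kN, rfl⟩ := Int.eq_ofNat_of_zero_le hk.1
    have hkm : kN < mN := by exact_mod_cast hk.2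
    have hiw : iN + kN < words.length := by omega
    have := congrArg (fun l => l[kN]?) h
    simp only [List.getElem?_take, List.getElem?_drop, List.getElem?_map] at this
    rw [List.getElem?_eq_getElem hiw, List.getElem?_eq_getElem hkm] at this
    simp only [hkm, if_pos, Option.map_some] at this
    rw [pvEqual]
    rw [show ((iN : Int) + (kN : Int)) = ((iN + kN : Nat) : Int) by push_cast; ring]
    rw [PySem.List.pyGetD_natCast, PySem.List.pyGetD_natCast]
    rw [List.getD_eq_getElem _ _ hiw, List.getD_eq_getElem _ _ hkm]
    simp only [beq_iff_eq]
    simpa using this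

-- folding the hash step from an arbitrary accumulator
lemma pvHroll_shift : ∀ (l : List Int) (acc : Int),
    l.foldl (fun a x => a * 1000003 + x) acc = acc * 1000003 ^ l.length + pvHroll l := by
  intro l
  induction l with
  | nil => intro acc; simp [pvHroll]
  | cons a t ih =>
    intro acc
    simp only [List.foldl_cons, List.length_cons]
    rw [ih (acc * 1000003 + a)]
    have h2 : pvHroll (a :: t) = (0 * 1000003 + a) * 1000003 ^ t.length + pvHroll t := by
      show List.foldl (fun a x => a * 1000003 + x) (0 * 1000003 + a) t = _
      exact ih (0 * 1000003 + a)
    rw [h2]; ring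

lemma pvHroll_cons (a : Int) (t : List Int) :
    pvHroll (a :: t) = a * 1000003 ^ t.length + pvHroll t := by
  show t.foldl _ (0 * 1000003 + a) = _
  rw [pvHroll_shift t (0 * 1000003 + a)]; ring

lemma pvHroll_append (t : List Int) (x : Int) :
    pvHroll (t ++ [x]) = pvHroll t * 1000003 + x := by
  simp [pvHroll, List.foldl_append]

-- B's initial-hash loop computes the hash of the first window
lemma pvFold_range (l : List Int) :
    ∀ (d jN : Nat) (acc : Int), jN + d ≤ l.length →
    (PySem.List.pyRange (jN : Int) ((jN : Int) + (d : Int)) 1).foldl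
        (fun a k => a * 1000003 + PySem.List.pyGetD l k 0) acc
      = ((l.drop jN).take d).foldl (fun a x => a * 1000003 + x) acc := by
  intro d
  induction d with
  | zero => intro jN acc _; simp [PySem.List.pyRange_one_eq_nil]
  | succ e ih =>
    intro jN acc h
    have hj : jN < l.length := by omega
    rw [PySem.List.pyRange_one_cons (by push_cast; omega)]
    rw [List.drop_eq_getElem_cons hj, List.take_succ_cons]
    simp only [List.foldl_cons]
    rw [PySem.List.pyGetD_natCast, List.getD_eq_getElem _ _ hj]
    have := ih (jN + 1) (acc * 1000003 + l[jN]) (by omega)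
    rw [show ((jN : Int) + 1 : Int) = ((jN + 1 : Nat) : Int) by push_cast; ring,
        show ((jN : Int) + ((e : Nat) + 1 : Nat) : Int) = ((jN + 1 : Nat) : Int) + (e : Int) by push_cast; ring]
    exact this

lemma pvTake_snoc (l : List Int) (s k : Nat) (h : s + k < l.length) :
    (l.drop s).take (k + 1) = (l.drop s).take k ++ [l[s + k]] := by
  rw [List.take_add_one]
  have hg : (l.drop s)[k]? = some l[s + k] := by
    rw [List.getElem?_drop, List.getElem?_eq_getElem (by omega)]
  rw [hg]
  simp

-- B's main loop, given the window-hash invariant, appends exactly where the slice matches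
lemma pvRoll (lw lm : List String) (hm1 : 1 ≤ lm.length) (hmn : lm.length ≤ lw.length) :
    ∀ (d jN : Nat) (cur : Int) (spans : List (List Int)),
      jN + d = lw.length - lm.length + 1 →
      (jN + lm.length ≤ lw.length →
        cur = pvHroll (((lw.map pvH).drop jN).take lm.length)) →
      ((PySem.List.pyRange (jN : Int) ((lw.length : Int) - (lm.length : Int) + 1) 1).foldl
          (pvStepB (lw.map pvH) lw lm (pvHroll (lm.map pvH))
            (1000003 ^ (((lm.length : Int) - 1).toNat)) (lw.length : Int) (lm.length : Int))
          (cur, spans)).2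
      = (PySem.List.pyRange (jN : Int) ((lw.length : Int) - (lm.length : Int) + 1) 1).foldl
          (fun spans i =>
            if PySem.List.slice lw (some i) (some (i + (lm.length : Int))) == lm then
              spans ++ [[i, i + (lm.length : Int) - 1]] else spans) spans := by
  intro d
  induction d with
  | zero =>
    intro jN cur spans hd _
    rw [PySem.List.pyRange_one_eq_nil (by omega)]
    simp
  | succ e ih =>
    intro jN cur spans hd hinv
    have hjw : jN + lm.length ≤ lw.length := by omega
    have hcur := hinv hjw
    rw [PySem.List.pyRange_one_cons (by omega)]
    simp only [List.foldl_cons]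
    -- the condition: hash check is redundant
    have hwin : ((lw.map pvH).drop jN).take lm.length
        = ((lw.drop jN).take lm.length).map pvH := by
      simp [List.map_drop, List.map_take]
    have hcond : (cur == pvHroll (lm.map pvH)
          && (PySem.List.slice lw (some (jN : Int))
                (some ((jN : Int) + (lm.length : Int))) == lm))
        = (PySem.List.slice lw (some (jN : Int))
                (some ((jN : Int) + (lm.length : Int))) == lm) := by
      rcases h : (PySem.List.slice lw (some (jN : Int))
          (some ((jN : Int) + (lm.length : Int))) == lm) with _ | _
      · simp
      · have hs : PySem.List.slice lw (some (jN : Int))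
            (some ((jN : Int) + (lm.length : Int))) = lm := by simpa using h
        rw [PySem.List.slice_natCast_add] at hs
        have : cur = pvHroll (lm.map pvH) := by rw [hcur, hwin, hs]
        simp [this]
    -- the rolled hash is the next window's hash
    have hstep : (pvStepB (lw.map pvH) lw lm (pvHroll (lm.map pvH))
          (1000003 ^ (((lm.length : Int) - 1).toNat)) (lw.length : Int) (lm.length : Int)
          (cur, spans) (jN : Int)).1
        = (if (jN : Int) + (lm.length : Int) < (lw.length : Int) then
            pvHroll (((lw.map pvH).drop (jN + 1)).take lm.length) else cur) := by
      simp only [pvStepB]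
      rcases lt_or_ge ((jN : Int) + (lm.length : Int)) (lw.length : Int) with hlt | hge
      · rw [if_pos hlt, if_pos hlt]
        have hltN : jN + lm.length < lw.length := by exact_mod_cast hlt
        have hjl : jN < (lw.map pvH).length := by simp; omega
        have hcons : ((lw.map pvH).drop jN).take lm.length
            = (lw.map pvH)[jN] :: (((lw.map pvH).drop (jN + 1)).take (lm.length - 1)) := by
          rw [List.drop_eq_getElem_cons hjl]
          conv_lhs => rw [show lm.length = lm.length - 1 + 1 from (by omega)]
          rw [List.take_succ_cons]
        have hlen : (((lw.map pvH).drop (jN + 1)).take (lm.length - 1)).length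
            = lm.length - 1 := by simp; omega
        have hpow : ((lm.length : Int) - 1).toNat = lm.length - 1 := by omega
        have hget : PySem.List.pyGetD (lw.map pvH) (jN : Int) 0 = (lw.map pvH)[jN] := by
          rw [PySem.List.pyGetD_natCast, List.getD_eq_getElem _ _ hjl]
        have hgm : ((jN : Int) + (lm.length : Int)) = ((jN + 1 + (lm.length - 1) : Nat) : Int) := by
          push_cast; omega
        have hjml : jN + 1 + (lm.length - 1) < (lw.map pvH).length := by simp; omega
        have hget2 : PySem.List.pyGetD (lw.map pvH) ((jN : Int) + (lm.length : Int)) 0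
            = (lw.map pvH)[jN + 1 + (lm.length - 1)] := by
          rw [hgm, PySem.List.pyGetD_natCast, List.getD_eq_getElem _ _ hjml]
        have hsnoc : ((lw.map pvH).drop (jN + 1)).take lm.length
            = (((lw.map pvH).drop (jN + 1)).take (lm.length - 1))
              ++ [(lw.map pvH)[jN + 1 + (lm.length - 1)]] := by
          conv_lhs => rw [show lm.length = lm.length - 1 + 1 from (by omega)]
          exact pvTake_snoc _ _ _ (by simp; omega)
        rw [hcur, hcons, pvHroll_cons, hlen, hget, hget2, hpow, hsnoc, pvHroll_append]
        ring
      · rw [if_neg (by omega), if_neg (by omega)]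
    have hspans : (pvStepB (lw.map pvH) lw lm (pvHroll (lm.map pvH))
          (1000003 ^ (((lm.length : Int) - 1).toNat)) (lw.length : Int) (lm.length : Int)
          (cur, spans) (jN : Int)).2
        = (if PySem.List.slice lw (some (jN : Int))
              (some ((jN : Int) + (lm.length : Int))) == lm then
            spans ++ [[(jN : Int), (jN : Int) + (lm.length : Int) - 1]] else spans) := by
      simp only [pvStepB, hcond]
    rw [show ((jN : Int) + 1 : Int) = ((jN + 1 : Nat) : Int) by push_cast; ring]
    rw [(Prod.mk.eta (p := pvStepB _ _ _ _ _ _ _ (cur, spans) (jN : Int))).symm, hstep, hspans]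
    rw [ih (jN + 1) _ _ (by omega)
      (by
        intro hfit
        rw [if_pos (by omega)])]

-- ===== VERDICT (by name: the statement is the Claim_ definition above) =====
theorem word_level_align_spec : Claim_equal_word_level_align := by
  intro words mention _
  unfold Spec_word_level_align word_level_align word_level_align_alt
  set mwords := (PySem.Str.split? mention " ").getD [] with hmw
  have hne : mwords ≠ [] := pvSplit_ne_nil mention
  have hmpos : 1 ≤ mwords.length := List.length_pos_of_ne_nil hne
  simp only [List.length_map]
  rcases le_or_gt (mwords.length : Int) (words.length : Int) with hle | hgt
  · -- the window fits at least potentially: both sides are the canonical filter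
    have hmnN : mwords.length ≤ words.length := by exact_mod_cast hle
    rw [if_neg (by omega)]
    have htarget : (mwords.map PySem.Str.lower).foldl (fun a x => a * 1000003 + pvH x) 0
        = pvHroll ((mwords.map PySem.Str.lower).map pvH) := by
      simp [pvHroll, List.foldl_map]
    have hinit : (PySem.List.pyRange 0 (mwords.length : Int) 1).foldl
        (fun a k => a * 1000003 + PySem.List.pyGetD ((words.map PySem.Str.lower).map pvH) k 0) 0
        = pvHroll (((((words.map PySem.Str.lower).map pvH)).drop 0).take mwords.length) := by
      have := pvFold_range ((words.map PySem.Str.lower).map pvH) mwords.length 0 0 (by simp; omega)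
      simpa [pvHroll] using this
    rw [htarget, hinit]
    have hB := pvRoll (words.map PySem.Str.lower) (mwords.map PySem.Str.lower)
      (by simpa using hmpos) (by simp; omega) (words.length - mwords.length + 1) 0
      (pvHroll (((((words.map PySem.Str.lower).map pvH)).drop 0).take mwords.length)) []
      (by simp) (by intro _; simp)
    simp only [List.length_map, Nat.cast_zero] at hB ⊢
    rw [hB]
    rw [PySem.List.foldl_congr_mem _ _
      (fun spans i =>
        if PySem.List.slice (words.map PySem.Str.lower) (some i)
            (some (i + (mwords.length : Int))) == mwords.map PySem.Str.lower then
          spans ++ [[i, i + (mwords.length : Int) - 1]] else spans) _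
      (by
        intro acc i hi
        rw [PySem.List.mem_pyRange_one] at hi
        rw [pvInnerA_eq words mwords i (mwords.length : Int)
          ((mwords.length : Int) - 1).toNat 0 (by omega) le_rfl acc]
        rw [pvCond_eq words mwords i hi.1 (by omega)])]
  · -- mention longer than the sentence: both empty
    have hgtN : words.length < mwords.length := by exact_mod_cast hgt
    rw [if_pos (by omega)]
    rw [PySem.List.pyRange_one_eq_nil (a := 0)
      (b := (words.length : Int) - (mwords.length : Int) + 1) (by omega)]
    rfl
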